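-- pv_equiv track=rewrite | github.com/Lezh1n1208/MyHomeWork | Python OnlineGDB/Buoi2/EX2_7.py | get_k_skips_n_grams
-- ===== SOURCE A (Python) =====
-- def get_k_skips_n_grams(k, n, input_list):
--     words = input_list.split()
--     result = []
--
--     def backtrack(start, current):
--         if len(current) == n:
--             result.append(" ".join(current))
--             return
--
--         for i in range(start + 1, min(start + k + 2, len(words))):
--             backtrack(i, current + [words[i]])
--
--     for i in range(len(words)):
--         backtrack(i, [words[i]])
--     return result
-- ===== SOURCE B (Python) =====
-- def get_k_skips_n_grams(k, n, input_list):
--     words = input_list.split()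
--     if n < 1:
--         return []
--     L = len(words)
--     out = []
--     for s in range(L):
--         level = [[s]]
--         for _ in range(n - 1):
--             if not level:
--                 break
--             level = [seq + [j]
--                      for seq in level
--                      for j in range(seq[-1] + 1, min(seq[-1] + k + 2, L))]
--         out.extend(" ".join(words[i] for i in seq) for seq in level)
--     return out
-- ===== Notes on version B (the rewrite author's own statement) =====
-- stated objective: alternative
-- what changed: Replaces the recursive DFS backtracking that builds each n-gram string during recursion with an iterative per-start level-wise expansion of index sequences (repeated flat extension of partial index lists, with early exit when a level empties), joining words only at the end.
import Mathlib
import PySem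

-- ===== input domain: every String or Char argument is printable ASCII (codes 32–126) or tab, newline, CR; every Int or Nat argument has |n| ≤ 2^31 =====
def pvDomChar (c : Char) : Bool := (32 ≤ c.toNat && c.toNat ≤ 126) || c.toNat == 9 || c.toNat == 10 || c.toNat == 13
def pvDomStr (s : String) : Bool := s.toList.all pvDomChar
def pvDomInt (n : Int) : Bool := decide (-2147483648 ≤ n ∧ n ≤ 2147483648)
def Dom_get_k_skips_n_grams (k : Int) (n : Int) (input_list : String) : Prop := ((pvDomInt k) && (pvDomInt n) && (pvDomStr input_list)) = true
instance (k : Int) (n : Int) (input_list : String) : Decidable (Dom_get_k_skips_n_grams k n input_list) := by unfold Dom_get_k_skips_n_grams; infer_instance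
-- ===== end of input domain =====

-- B replaces A's recursive DFS backtracking by an iterative level-wise expansion of
-- index sequences, joining the words only at the end (objective: alternative, same cost).

-- ===== PORT A =====
-- recursive helper 'backtrack'; the shared result list, accumulated in DFS order,
-- is the in-order flattening of the recursive calls' contributions
def pvBtrack (words : List String) (k n : Int) (start : Int) (current : List String) : List String :=
  if (current.length : Int) = n then [PySem.Str.join " " current]
  else
    ((PySem.List.pyRange (start + 1) (min (start + k + 2) (words.length : Int)) 1).attach.map
      (fun i => pvBtrack words k n i.1 (current ++ [PySem.List.pyGetD words i.1 ""]))).flatten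
termination_by ((words.length : Int) - start).toNat
decreasing_by
  have h := PySem.List.mem_pyRange_one.mp i.2
  omega

def get_k_skips_n_grams (k : Int) (n : Int) (input_list : String) : List String :=
  let words := PySem.Str.split₀ input_list
  ((PySem.List.pyRange 0 (words.length : Int) 1).map
    (fun i => pvBtrack words k n i [PySem.List.pyGetD words i ""])).flatten

-- ===== PORT B =====
-- one expansion level: extend every partial index sequence by each admissible next index
def pvStep (L k : Int) (level : List (List Int)) : List (List Int) :=
  level.flatMap (fun seq =>
    (PySem.List.pyRange ((PySem.List.pyGet? seq (-1)).getD 0 + 1)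
        (min ((PySem.List.pyGet? seq (-1)).getD 0 + k + 2) L) 1).map (fun j => seq ++ [j]))

-- the 'for _ in range(n-1): if not level: break; level = …' loop
def pvExpand (L k : Int) : Nat → List (List Int) → List (List Int)
  | 0, level => level
  | t + 1, level => if level = [] then level else pvExpand L k t (pvStep L k level)

def get_k_skips_n_grams_alt (k : Int) (n : Int) (input_list : String) : List String :=
  let words := PySem.Str.split₀ input_list
  if n < 1 then []
  else
    (PySem.List.pyRange 0 (words.length : Int) 1).flatMap (fun s =>
      (pvExpand (words.length : Int) k (n - 1).toNat [[s]]).map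
        (fun seq => PySem.Str.join " " (seq.map (fun i => PySem.List.pyGetD words i ""))))

-- ===== PRECONDITION & SPEC =====
def Spec_get_k_skips_n_grams (k : Int) (n : Int) (input_list : String) (out : List String) : Prop := out = get_k_skips_n_grams_alt k n input_list
instance (k : Int) (n : Int) (input_list : String) (out : List String) : Decidable (Spec_get_k_skips_n_grams k n input_list out) := by unfold Spec_get_k_skips_n_grams; infer_instance

-- ===== CLAIM (what is proved, stated in full; the proofs are below) =====
def Claim_equal_get_k_skips_n_grams : Prop := ∀ (k : Int) (n : Int) (input_list : String), Dom_get_k_skips_n_grams k n input_list → Spec_get_k_skips_n_grams k n input_list (get_k_skips_n_grams k n input_list)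

-- ===== LEMMAS AND PROOFS =====

theorem pvStep_nil (L k : Int) : pvStep L k [] = [] := rfl

theorem pvStep_iterate_nil (L k : Int) (t : Nat) : (pvStep L k)^[t] [] = [] := by
  induction t with
  | zero => rfl
  | succ t ih => rw [Function.iterate_succ_apply, pvStep_nil, ih]

theorem pvExpand_eq_iterate (L k : Int) (t : Nat) (level : List (List Int)) :
    pvExpand L k t level = (pvStep L k)^[t] level := by
  induction t generalizing level with
  | zero => rfl
  | succ t ih =>
    rw [pvExpand]
    split
    · next h => rw [h, pvStep_iterate_nil]
    · rw [ih, Function.iterate_succ_apply]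

theorem pvStep_append (L k : Int) (l1 l2 : List (List Int)) :
    pvStep L k (l1 ++ l2) = pvStep L k l1 ++ pvStep L k l2 := by
  simp [pvStep]

theorem pvStep_iterate_append (L k : Int) (t : Nat) (l1 l2 : List (List Int)) :
    (pvStep L k)^[t] (l1 ++ l2) = (pvStep L k)^[t] l1 ++ (pvStep L k)^[t] l2 := by
  induction t generalizing l1 l2 with
  | zero => rfl
  | succ t ih =>
    rw [Function.iterate_succ_apply, pvStep_append, ih,
      Function.iterate_succ_apply, Function.iterate_succ_apply]

theorem pvStep_iterate_flatMap (L k : Int) (t : Nat) (l : List (List Int)) :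
    (pvStep L k)^[t] l = l.flatMap (fun s => (pvStep L k)^[t] [s]) := by
  induction l with
  | nil => simp [pvStep_iterate_nil]
  | cons s rest ih =>
    have h : s :: rest = [s] ++ rest := rfl
    rw [h, pvStep_iterate_append, ih]
    simp

theorem pvBtrack_nil (words : List String) (k n : Int) (start : Int) (current : List String)
    (h : n < (current.length : Int)) : pvBtrack words k n start current = [] := by
  induction start, current using pvBtrack.induct words k n with
  | case1 start current heq => omega
  | case2 start current heq ih =>
    rw [pvBtrack, if_neg heq]
    simp only [List.flatten_eq_nil_iff, List.mem_map]
    rintro _ ⟨i, _, rfl⟩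
    exact ih i (by simp; omega)

theorem pvBtrack_expand (words : List String) (k n : Int) (m : Nat) :
    ∀ (seq : List Int) (x : Int), ((PySem.List.pyGet? seq (-1)).getD 0) = x →
      ((seq.length : Int) + m = n) →
      pvBtrack words k n x (seq.map (fun i => PySem.List.pyGetD words i "")) =
        ((pvStep (words.length : Int) k)^[m] [seq]).map
          (fun s => PySem.Str.join " " (s.map (fun i => PySem.List.pyGetD words i ""))) := by
  induction m with
  | zero =>
    intro seq x hx hlen
    rw [pvBtrack, if_pos (by simp; omega)]
    simp
  | succ m ih =>
    intro seq x hx hlen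
    rw [pvBtrack, if_neg (by simp; omega)]
    have hstep : pvStep (words.length : Int) k [seq] =
        (PySem.List.pyRange (x + 1) (min (x + k + 2) (words.length : Int)) 1).map
          (fun j => seq ++ [j]) := by
      simp [pvStep, hx]
    rw [Function.iterate_succ_apply, hstep, pvStep_iterate_flatMap, List.flatMap_map,
      List.map_flatMap, ← List.flatMap_def]
    simp only [List.flatMap_subtype, List.unattach_attach]
    apply List.flatMap_congr
    intro j hj
    have hj' := PySem.List.mem_pyRange_one.mp hj
    have hlast : ((PySem.List.pyGet? (seq ++ [j]) (-1)).getD 0) = j := by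
      rw [PySem.List.pyGet?_neg_one_append_singleton]; rfl
    have := ih (seq ++ [j]) j hlast (by simp; omega)
    simpa [List.map_append] using this

-- ===== VERDICT (by name: the statement is the Claim_ definition above) =====
theorem get_k_skips_n_grams_spec : Claim_equal_get_k_skips_n_grams := by
  intro k n input_list _
  unfold Spec_get_k_skips_n_grams get_k_skips_n_grams get_k_skips_n_grams_alt
  set words := PySem.Str.split₀ input_list with hw
  by_cases hn : n < 1
  · rw [if_pos hn]
    simp only [List.flatten_eq_nil_iff, List.mem_map]
    rintro _ ⟨i, _, rfl⟩
    exact pvBtrack_nil words k n i _ (by simp; omega)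
  · rw [if_neg hn, ← List.flatMap_def]
    apply List.flatMap_congr
    intro i hi
    have hlast : ((PySem.List.pyGet? ([i] : List Int) (-1)).getD 0) = i := by
      rw [PySem.List.pyGet?_neg_one]; rfl
    have hlen : ((([i] : List Int).length : Int) + ((n - 1).toNat : Nat) = n) := by
      simp; omega
    have h := pvBtrack_expand words k n (n - 1).toNat [i] i hlast hlen
    rw [pvExpand_eq_iterate]
    simpa using h
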